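-- pv_equiv track=rewrite | github.com/SwiftWare-Lab/typed-data-transformation | modeling/clustering/determine-k.py | reorder_groups_by_labels
-- ===== SOURCE A (Python) =====
-- def reorder_groups_by_labels(byte_groups, labels):
--     """
--     Reorder the list of groups by ascending cluster label (and by original index).
--     Returns (reordered_groups, cluster_config_str)
--         e.g. cluster_config_str => "(1,2)|(3)|(4,5)"
--     """
--     labeled = list(zip(range(len(byte_groups)), labels))  # (orig_idx, cluster_label)
--     labeled_sorted = sorted(labeled, key=lambda x: (x[1], x[0]))
--
--     reordered = []
--     cluster_dict = {}
--     for (orig_idx, c_label) in labeled_sorted: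
--         reordered.append(byte_groups[orig_idx])
--         cluster_dict.setdefault(c_label, []).append(orig_idx + 1)  # +1 for 1-based group IDs
--
--     cluster_str_parts = []
--     for c_label in sorted(cluster_dict.keys()):
--         members = cluster_dict[c_label]
--         cluster_str_parts.append("({})".format(",".join(str(x) for x in members)))
--     cluster_config_str = "|".join(cluster_str_parts)
--
--     return reordered, cluster_config_str
-- ===== SOURCE B (Python) =====
-- def reorder_groups_by_labels(byte_groups, labels):
--     """Bucket original indices by label in one pass, then walk the sorted
--     distinct labels once; no global sort of (index, label) pairs."""
--     buckets = {}
--     for idx, (_, lab) in enumerate(zip(byte_groups, labels)):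
--         buckets.setdefault(lab, []).append(idx)
--
--     reordered = []
--     parts = []
--     for lab in sorted(buckets):
--         idxs = buckets[lab]
--         for i in idxs:
--             reordered.append(byte_groups[i])
--         parts.append("({})".format(",".join(str(i + 1) for i in idxs)))
--     return reordered, "|".join(parts)
-- ===== Notes on version B (the rewrite author's own statement) =====
-- stated objective: alternative
-- what changed: B buckets original indices per label in a single pass over zip(byte_groups, labels) and then walks only the sorted distinct labels, instead of A's global stable sort of all (index, label) pairs followed by a re-grouping dict pass.
import Mathlib
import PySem

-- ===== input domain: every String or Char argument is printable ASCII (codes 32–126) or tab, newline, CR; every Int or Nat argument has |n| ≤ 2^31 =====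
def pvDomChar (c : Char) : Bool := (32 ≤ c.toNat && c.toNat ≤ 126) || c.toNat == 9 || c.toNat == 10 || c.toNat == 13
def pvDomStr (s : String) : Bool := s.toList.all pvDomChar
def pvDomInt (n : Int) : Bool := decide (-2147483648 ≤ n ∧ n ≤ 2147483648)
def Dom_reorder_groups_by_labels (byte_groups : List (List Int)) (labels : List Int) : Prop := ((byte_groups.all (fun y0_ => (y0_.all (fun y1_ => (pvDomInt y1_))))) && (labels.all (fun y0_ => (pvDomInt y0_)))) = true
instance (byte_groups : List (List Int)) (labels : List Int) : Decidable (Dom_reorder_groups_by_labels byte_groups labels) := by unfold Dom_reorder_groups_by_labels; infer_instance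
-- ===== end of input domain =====

-- B buckets the original indices by label in one pass and walks the sorted distinct
-- labels, instead of globally sorting all (index, label) pairs (objective: alternative).

-- ===== PORT A =====
def reorder_groups_by_labels (byte_groups : List (List Int)) (labels : List Int) : List (List Int) × String :=
  -- labeled = list(zip(range(len(byte_groups)), labels))
  let labeled := (PySem.List.pyRange 0 (byte_groups.length : Int) 1).zip labels
  -- labeled_sorted = sorted(labeled, key=lambda x: (x[1], x[0]))
  let labeled_sorted := PySem.List.sorted2 labeled (fun x => x.2) (fun x => x.1)
  -- for (orig_idx, c_label) in labeled_sorted: reordered.append(...); cluster_dict.setdefault(...).append(...)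
  let st := labeled_sorted.foldl
    (fun (acc : List (List Int) × PySem.Dict Int (List Int)) p =>
      (acc.1 ++ [PySem.List.pyGetD byte_groups p.1 []],   -- byte_groups[orig_idx]: 0 ≤ orig_idx < len, so getD is exact
       acc.2.modify p.2 [] (fun m => m ++ [p.1 + 1])))    -- setdefault(c_label, []).append(orig_idx + 1)
    ([], PySem.Dict.empty)
  -- for c_label in sorted(cluster_dict.keys()): parts.append("({})".format(",".join(...)))
  let parts := (PySem.List.sorted st.2.keys (fun x => x)).foldl
    (fun acc c => acc ++ ["(" ++ PySem.Str.join "," ((st.2.getD c []).map PySem.Int.toStr) ++ ")"]) []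
    -- cluster_dict[c_label]: c_label is a key of the dict, so the lookup is total; getD is exact here
  (st.1, PySem.Str.join "|" parts)

-- ===== PORT B =====
def reorder_groups_by_labels_alt (byte_groups : List (List Int)) (labels : List Int) : List (List Int) × String :=
  -- for idx, (_, lab) in enumerate(zip(byte_groups, labels)): buckets.setdefault(lab, []).append(idx)
  let buckets := (PySem.List.enumerate (byte_groups.zip labels) 0).foldl
    (fun (d : PySem.Dict Int (List Int)) p => d.modify p.2.2 [] (fun m => m ++ [p.1]))
    PySem.Dict.empty
  -- for lab in sorted(buckets): extend reordered with byte_groups[i]; append "(...)" part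
  let st := (PySem.List.sorted buckets.keys (fun x => x)).foldl
    (fun (acc : List (List Int) × List String) lab =>
      (acc.1 ++ (buckets.getD lab []).map (fun i => PySem.List.pyGetD byte_groups i []),
       acc.2 ++ ["(" ++ PySem.Str.join "," ((buckets.getD lab []).map (fun i => PySem.Int.toStr (i + 1))) ++ ")"]))
    ([], [])
  (st.1, PySem.Str.join "|" st.2)

-- ===== PRECONDITION & SPEC =====
def Spec_reorder_groups_by_labels (byte_groups : List (List Int)) (labels : List Int) (out : List (List Int) × String) : Prop := out = reorder_groups_by_labels_alt byte_groups labels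
instance (byte_groups : List (List Int)) (labels : List Int) (out : List (List Int) × String) : Decidable (Spec_reorder_groups_by_labels byte_groups labels out) := by unfold Spec_reorder_groups_by_labels; infer_instance

-- ===== CLAIM (what is proved, stated in full; the proofs are below) =====
def Claim_equal_reorder_groups_by_labels : Prop := ∀ (byte_groups : List (List Int)) (labels : List Int), Dom_reorder_groups_by_labels byte_groups labels → Spec_reorder_groups_by_labels byte_groups labels (reorder_groups_by_labels byte_groups labels)

-- ===== LEMMAS AND PROOFS =====

theorem pv_zip_range_eq_enumerate (bg : List (List Int)) (labels : List Int) (s : Int) :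
    (PySem.List.pyRange s (s + bg.length) 1).zip labels
      = (PySem.List.enumerate (bg.zip labels) s).map (fun p => (p.1, p.2.2)) := by
  induction bg generalizing labels s with
  | nil => simp [PySem.List.pyRange_one_eq_nil, PySem.List.enumerate_nil]
  | cons g bg ih =>
    cases labels with
    | nil => simp [PySem.List.enumerate_nil]
    | cons l ls =>
      rw [PySem.List.pyRange_one_cons (by simp only [List.length_cons]; push_cast; omega)]
      simp only [List.zip_cons_cons, PySem.List.enumerate_cons, List.map_cons, List.length_cons]
      have hb : s + (((bg.length : Int)) + 1) = (s + 1) + bg.length := by ring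
      push_cast
      rw [hb]
      exact congrArg _ (ih ls (s + 1))


def pvLt (a b : Int × Int) : Bool :=
  decide (a.2 < b.2) || (!decide (b.2 < a.2) && decide (a.1 < b.1))

theorem pvLt_iff (a b : Int × Int) :
    pvLt a b = true ↔ (a.2 < b.2 ∨ (a.2 = b.2 ∧ a.1 < b.1)) := by
  simp [pvLt]; omega

theorem pvLt_eq_false_iff (a b : Int × Int) :
    pvLt a b = false ↔ ¬ (a.2 < b.2 ∨ (a.2 = b.2 ∧ a.1 < b.1)) := by
  rw [← pvLt_iff]; simp

theorem pv_insertBy_pairwise (x : Int × Int) (ys : List (Int × Int))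
    (h : ys.Pairwise (fun a b => pvLt b a = false)) :
    (PySem.List.insertBy pvLt x ys).Pairwise (fun a b => pvLt b a = false) := by
  induction ys with
  | nil => simp [PySem.List.insertBy]
  | cons y ys ih =>
    by_cases hxy : pvLt x y = true
    · have h' : (PySem.List.insertBy pvLt x (y :: ys)) = x :: y :: ys := by
        simp [PySem.List.insertBy, hxy]
      rw [h']
      rcases List.pairwise_cons.1 h with ⟨hy, hys⟩
      refine List.pairwise_cons.2 ⟨?_, h⟩
      intro z hz
      rcases List.mem_cons.1 hz with rfl | hz
      · rw [pvLt_iff] at hxy; rw [pvLt_eq_false_iff]; omega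
      · have h1 := hy z hz
        rw [pvLt_iff] at hxy; rw [pvLt_eq_false_iff] at h1 ⊢; omega
    · have h' : (PySem.List.insertBy pvLt x (y :: ys)) = y :: PySem.List.insertBy pvLt x ys := by
        simp [PySem.List.insertBy, hxy]
      rw [h']
      rcases List.pairwise_cons.1 h with ⟨hy, hys⟩
      refine List.pairwise_cons.2 ⟨?_, ih hys⟩
      intro z hz
      rcases (PySem.List.insertBy_mem_iff pvLt x z ys).1 hz with rfl | hz
      · simpa using hxy
      · exact hy z hz

theorem pv_foldl_insertBy_pairwise (xs acc : List (Int × Int))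
    (h : acc.Pairwise (fun a b => pvLt b a = false)) :
    (xs.foldl (fun acc x => PySem.List.insertBy pvLt x acc) acc).Pairwise
      (fun a b => pvLt b a = false) := by
  induction xs generalizing acc with
  | nil => exact h
  | cons x xs ih => exact ih _ (pv_insertBy_pairwise x acc h)

theorem pv_sorted2_eq (xs ys : List (Int × Int)) (hperm : ys.Perm xs)
    (hpw : ys.Pairwise (fun a b => a.2 < b.2 ∨ (a.2 = b.2 ∧ a.1 < b.1))) :
    PySem.List.sorted2 xs (fun x => x.2) (fun x => x.1) = ys := by
  have hdef : PySem.List.sorted2 xs (fun x => x.2) (fun x => x.1)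
      = xs.foldl (fun acc x => PySem.List.insertBy pvLt x acc) [] := rfl
  have hp1 : (PySem.List.sorted2 xs (fun x => x.2) (fun x => x.1)).Pairwise
      (fun a b => pvLt b a = false) := by
    rw [hdef]; exact pv_foldl_insertBy_pairwise xs [] (by simp)
  have hp2 : ys.Pairwise (fun a b => pvLt b a = false) := by
    refine hpw.imp ?_
    intro a b hab
    rw [pvLt_eq_false_iff]; omega
  have hperm2 : (PySem.List.sorted2 xs (fun x => x.2) (fun x => x.1)).Perm ys :=
    (PySem.List.sorted2_perm xs _ _ false).trans hperm.symm
  refine List.Perm.eq_of_pairwise ?_ hp1 hp2 hperm2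
  intro a b _ _ h1 h2
  rw [pvLt_eq_false_iff] at h1 h2
  have : a.1 = b.1 ∧ a.2 = b.2 := by omega
  exact Prod.ext this.1 this.2


theorem pv_flatMap_filter_perm (ks : List Int) (ps : List (Int × Int))
    (hnd : ks.Nodup) (hcov : ∀ p ∈ ps, p.2 ∈ ks) :
    (ks.flatMap (fun k => ps.filter (fun p => p.2 == k))).Perm ps := by
  induction ks generalizing ps with
  | nil =>
    cases ps with
    | nil => simp
    | cons p ps => exact absurd (hcov p (by simp)) (by simp)
  | cons k ks ih =>
    rcases List.nodup_cons.1 hnd with ⟨hk, hnd'⟩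
    have hmap : ks.flatMap (fun k' => ps.filter (fun p => p.2 == k'))
        = ks.flatMap (fun k' => (ps.filter (fun p => !(p.2 == k))).filter (fun p => p.2 == k')) := by
      apply List.flatMap_congr
      intro k' hk'
      rw [List.filter_filter]
      refine (List.filter_congr ?_).symm
      intro p _
      by_cases h : p.2 = k'
      · have hne : ¬ (k' = k) := by rintro rfl; exact hk hk'
        simp [h, hne]
      · simp [h]
    have ihp := ih (ps.filter (fun p => !(p.2 == k))) hnd' (by
      intro p hp
      rcases List.mem_filter.1 hp with ⟨hp1, hp2⟩
      rcases List.mem_cons.1 (hcov p hp1) with h | h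
      · simp [h] at hp2
      · exact h)
    rw [List.flatMap_cons, hmap]
    exact (ihp.append_left _).trans (List.filter_append_perm _ ps)


theorem pv_flatMap_filter_self (ks : List Int) (ps : List (Int × Int)) (c : Int)
    (hnd : ks.Nodup) :
    ((ks.flatMap (fun k => ps.filter (fun p => p.2 == k))).filter (fun p => p.2 == c))
      = if c ∈ ks then ps.filter (fun p => p.2 == c) else [] := by
  induction ks with
  | nil => simp
  | cons k ks ih =>
    rcases List.nodup_cons.1 hnd with ⟨hk, hnd'⟩
    rw [List.flatMap_cons, List.filter_append, ih hnd']
    by_cases hck : c = k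
    · subst hck
      have h1 : (ps.filter (fun p => p.2 == c)).filter (fun p => p.2 == c)
          = ps.filter (fun p => p.2 == c) := by
        rw [List.filter_filter]; apply List.filter_congr; intro p _; by_cases h : p.2 = c <;> simp [h]
      simp [h1, hk]
    · have h1 : (ps.filter (fun p => p.2 == k)).filter (fun p => p.2 == c) = [] := by
        rw [List.filter_filter, List.filter_eq_nil_iff]
        intro p _
        by_cases h : p.2 = k
        · simp [h]; omega
        · simp [h]
      simp [h1, hck]

theorem pv_getD_group {β : Type} (ls : List β) (key : β → Int) (val : β → Int) (c : Int) :
    ((ls.foldl (fun (d : PySem.Dict Int (List Int)) p => d.modify (key p) [] (fun m => m ++ [val p]))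
        PySem.Dict.empty).getD c [])
      = (ls.filter (fun p => key p == c)).map val := by
  have h := PySem.Dict.getD_foldl_modify_append (ls.map (fun p => (key p, val p))) PySem.Dict.empty c
  rw [List.foldl_map] at h
  simp only [PySem.Dict.getD_empty, List.nil_append] at h
  rw [h, List.filter_map, List.map_map]
  rfl

theorem pv_sorted_ofList_perm (xs ys : List Int) (h : xs.Perm ys) :
    PySem.List.sorted (PySem.Set.ofList xs) (fun x => x)
      = PySem.List.sorted (PySem.Set.ofList ys) (fun x => x) := by
  apply PySem.List.sorted_eq_sorted_of_perm _ _ _ (fun a b hab => hab)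
  rw [List.perm_ext_iff_of_nodup (PySem.Set.nodup_ofList xs) (PySem.Set.nodup_ofList ys)]
  intro a
  rw [PySem.Set.mem_ofList, PySem.Set.mem_ofList]
  exact h.mem_iff

theorem pv_main (bg : List (List Int)) (labels : List Int) :
    reorder_groups_by_labels bg labels = reorder_groups_by_labels_alt bg labels := by
  simp only [reorder_groups_by_labels, reorder_groups_by_labels_alt]
  have h0 : (PySem.List.pyRange 0 (bg.length : Int) 1).zip labels
      = (PySem.List.enumerate (bg.zip labels) 0).map (fun p => (p.1, p.2.2)) := by
    have := pv_zip_range_eq_enumerate bg labels 0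
    rwa [zero_add] at this
  set e := PySem.List.enumerate (bg.zip labels) 0 with he
  set labeled := (PySem.List.pyRange 0 (bg.length : Int) 1).zip labels with hlab
  set S := PySem.List.sorted (PySem.Set.ofList (labeled.map (fun p => p.2))) (fun x => x) with hS
  set ys := S.flatMap (fun k => labeled.filter (fun p => p.2 == k)) with hys
  -- basic facts
  have hpwlab : labeled.Pairwise (fun a b => a.1 < b.1) := by
    rw [h0, List.pairwise_map]
    exact PySem.List.pairwise_lt_enumerate _ 0
  have hSnd : S.Nodup :=
    (PySem.List.sorted_perm _ _ false).nodup_iff.2 (PySem.Set.nodup_ofList _)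
  have hSmem : ∀ p ∈ labeled, p.2 ∈ S := by
    intro p hp
    rw [hS, PySem.List.mem_sorted, PySem.Set.mem_ofList]
    exact List.mem_map_of_mem hp
  have hperm : ys.Perm labeled := pv_flatMap_filter_perm S labeled hSnd hSmem
  have hpwys : ys.Pairwise (fun a b => a.2 < b.2 ∨ (a.2 = b.2 ∧ a.1 < b.1)) := by
    rw [hys, List.pairwise_flatMap]
    constructor
    · intro k _
      refine (hpwlab.filter _).imp_of_mem ?_
      intro a b ha hb hab
      have ha2 : a.2 = k := by simpa using (List.mem_filter.1 ha).2
      have hb2 : b.2 = k := by simpa using (List.mem_filter.1 hb).2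
      exact Or.inr ⟨ha2.trans hb2.symm, hab⟩
    · refine List.Pairwise.imp_of_mem ?_ (PySem.List.sorted_ofList_pairwise_lt _)
      intro k1 k2 _ _ hlt x hx y hy
      have hx2 : x.2 = k1 := by simpa using (List.mem_filter.1 hx).2
      have hy2 : y.2 = k2 := by simpa using (List.mem_filter.1 hy).2
      exact Or.inl (by rw [hx2, hy2]; exact hlt)
  have hsorted : PySem.List.sorted2 labeled (fun x => x.2) (fun x => x.1) = ys :=
    pv_sorted2_eq labeled ys hperm hpwys
  have hfilter : ∀ k : Int, labeled.filter (fun p => p.2 == k)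
      = (e.filter (fun p => p.2.2 == k)).map (fun p => (p.1, p.2.2)) := by
    intro k
    rw [h0, List.filter_map]
    rfl
  have hmap2 : labeled.map (fun p => p.2) = e.map (fun p => p.2.2) := by
    rw [h0, List.map_map]
    rfl
  have hfil : ∀ c ∈ S, ys.filter (fun p => p.2 == c) = labeled.filter (fun p => p.2 == c) := by
    intro c hc
    rw [hys, pv_flatMap_filter_self S labeled c hSnd, if_pos hc]
  -- split the pair-state folds
  rw [hsorted]
  rw [PySem.List.foldl_prod_mk
    (fun (a : List (List Int)) (p : Int × Int) => a ++ [PySem.List.pyGetD bg p.1 []])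
    (fun (d : PySem.Dict Int (List Int)) (p : Int × Int) => d.modify p.2 [] (fun m => m ++ [p.1 + 1]))
    ys [] PySem.Dict.empty]
  rw [PySem.Dict.keys_foldl_modify_key, PySem.Dict.keys_empty, PySem.Set.update_nil_left,
      PySem.Dict.keys_foldl_modify_key, PySem.Dict.keys_empty, PySem.Set.update_nil_left]
  simp only [pv_getD_group]
  have hSA : PySem.List.sorted (PySem.Set.ofList (ys.map (fun x => x.2))) (fun x => x) = S := by
    rw [hS]
    exact pv_sorted_ofList_perm _ _ (hperm.map _)
  have hSB : PySem.List.sorted (PySem.Set.ofList (e.map (fun x => x.2.2))) (fun x => x) = S := by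
    rw [hS, hmap2]
  rw [hSA, hSB]
  rw [PySem.List.foldl_prod_mk
    (fun (a : List (List Int)) (lab : Int) =>
      a ++ ((e.filter (fun p => p.2.2 == lab)).map (fun x => x.1)).map (fun i => PySem.List.pyGetD bg i []))
    (fun (a : List String) (lab : Int) =>
      a ++ ["(" ++ PySem.Str.join "," (((e.filter (fun p => p.2.2 == lab)).map (fun x => x.1)).map (fun i => PySem.Int.toStr (i + 1))) ++ ")"])
    S [] []]
  dsimp only
  rw [PySem.List.foldl_append_singleton_eq_map, PySem.List.foldl_append_singleton_eq_map,
      PySem.List.foldl_append_singleton_eq_map,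
      PySem.List.foldl_append_eq_flatMap, List.nil_append, List.nil_append, List.nil_append, List.nil_append]
  rw [Prod.mk.injEq]
  refine ⟨?_, ?_⟩
  · rw [hys, List.map_flatMap]
    refine List.flatMap_congr ?_
    intro k _
    rw [hfilter k, List.map_map, List.map_map]
    rfl
  · refine congrArg _ ?_
    refine List.map_congr_left ?_
    intro c hc
    rw [hfil c hc, hfilter c, List.map_map, List.map_map, List.map_map]
    rfl

-- ===== VERDICT (by name: the statement is the Claim_ definition above) =====
theorem reorder_groups_by_labels_spec : Claim_equal_reorder_groups_by_labels := by
  intro bg labels _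
  unfold Spec_reorder_groups_by_labels
  exact pv_main bg labels
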